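-- pv_equiv track=rewrite | github.com/h3shiri/intro2CS | EX5/ex5_final_version.py | sum_basket
-- ===== SOURCE A (Python) =====
-- def sum_basket(price_list):
--     """ Receives a list of prices
--     Returns a tuple - the sum of the list (when ignoring Nones)
--     and the number of missing items (Number of Nones)
--     """
--
--     sum_price_list = 0
--     missing_items = 0
--
--     for price in price_list:
--         if price is None:
--             missing_items += 1
--         else:
--             sum_price_list += price
--
--     price_tuple = (sum_price_list, missing_items)
--     return price_tuple
-- ===== SOURCE B (Python) =====
-- def sum_basket(price_list):
--     """Divide and conquer: split the list in half, solve each half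
--     recursively, combine (sums add, missing counts add)."""
--     n = len(price_list)
--     if n == 0:
--         return (0, 0)
--     if n == 1:
--         p = price_list[0]
--         return (0, 1) if p is None else (p, 0)
--     mid = n // 2
--     s1, m1 = sum_basket(price_list[:mid])
--     s2, m2 = sum_basket(price_list[mid:])
--     return (s1 + s2, m1 + m2)
-- ===== Notes on version B (the rewrite author's own statement) =====
-- stated objective: alternative
-- what changed: Replaces the single left-to-right loop with two accumulators by a divide-and-conquer recursion: split the list at its midpoint, solve each half recursively, and add the two (sum, missing) results; correct because both sum and None-count are associative over concatenation.
import Mathlib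
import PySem

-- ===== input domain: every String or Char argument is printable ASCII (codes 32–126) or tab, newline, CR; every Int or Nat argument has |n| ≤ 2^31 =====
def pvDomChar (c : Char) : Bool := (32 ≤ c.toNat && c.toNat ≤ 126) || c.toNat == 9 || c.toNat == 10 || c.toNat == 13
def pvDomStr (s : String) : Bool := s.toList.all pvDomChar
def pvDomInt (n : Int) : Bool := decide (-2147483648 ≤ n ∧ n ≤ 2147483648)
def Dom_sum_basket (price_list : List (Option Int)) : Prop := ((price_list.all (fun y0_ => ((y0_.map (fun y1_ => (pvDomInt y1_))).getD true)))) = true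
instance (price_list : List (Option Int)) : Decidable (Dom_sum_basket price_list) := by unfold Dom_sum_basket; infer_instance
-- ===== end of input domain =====

-- B replaces A's single two-accumulator loop by a midpoint divide-and-conquer recursion (alternative decomposition, same result).

-- ===== PORT A =====
-- single pass, two accumulators, branch on None
def sum_basket (price_list : List (Option Int)) : Int × Int :=
  let st := price_list.foldl (fun (acc : Int × Int) price =>
    match price with
    | none => (acc.1, acc.2 + 1)
    | some p => (acc.1 + p, acc.2)) (0, 0)
  (st.1, st.2)

-- ===== PORT B =====
-- divide and conquer: split at the midpoint, recurse on each half, add componentwise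
def sum_basket_alt (price_list : List (Option Int)) : Int × Int :=
  match h : price_list with
  | [] => (0, 0)
  | [p] =>
    match p with
    | none => (0, 1)
    | some v => (v, 0)
  | _ :: _ :: _ =>
    let mid := price_list.length / 2
    let r1 := sum_basket_alt (price_list.take mid)
    let r2 := sum_basket_alt (price_list.drop mid)
    (r1.1 + r2.1, r1.2 + r2.2)
termination_by price_list.length
decreasing_by
  · simp [h]; omega
  · simp [h]; omega

-- ===== PRECONDITION & SPEC =====
def Spec_sum_basket (price_list : List (Option Int)) (out : Int × Int) : Prop := out = sum_basket_alt price_list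
instance (price_list : List (Option Int)) (out : Int × Int) : Decidable (Spec_sum_basket price_list out) := by unfold Spec_sum_basket; infer_instance

-- ===== CLAIM (what is proved, stated in full; the proofs are below) =====
def Claim_equal_sum_basket : Prop := ∀ (price_list : List (Option Int)), Dom_sum_basket price_list → Spec_sum_basket price_list (sum_basket price_list)

-- ===== LEMMAS AND PROOFS =====

-- canonical value both ports compute
def pvF (l : List (Option Int)) : Int × Int :=
  ((l.filterMap id).sum, (PySem.List.count l none : Int))

lemma pvF_append (l r : List (Option Int)) :
    pvF (l ++ r) = ((pvF l).1 + (pvF r).1, (pvF l).2 + (pvF r).2) := by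
  simp [pvF, PySem.List.count]

lemma sum_basket_fold (l : List (Option Int)) (s m : Int) :
    l.foldl (fun (acc : Int × Int) price =>
      match price with
      | none => (acc.1, acc.2 + 1)
      | some p => (acc.1 + p, acc.2)) (s, m)
    = (s + (pvF l).1, m + (pvF l).2) := by
  induction l generalizing s m with
  | nil => simp [pvF, PySem.List.count]
  | cons h t ih =>
    cases h with
    | none => simp [pvF, PySem.List.count, ih]; ring
    | some p => simp [pvF, PySem.List.count, ih, add_assoc]

lemma sum_basket_eq_pvF (l : List (Option Int)) : sum_basket l = pvF l := by
  simp [sum_basket, sum_basket_fold]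

lemma sum_basket_alt_eq_pvF (l : List (Option Int)) : sum_basket_alt l = pvF l := by
  induction l using sum_basket_alt.induct with
  | case1 => simp [sum_basket_alt, pvF, PySem.List.count]
  | case2 => simp [sum_basket_alt, pvF, PySem.List.count]
  | case3 v => simp [sum_basket_alt, pvF, PySem.List.count]
  | case4 a b t mid ih2 ih1 =>
    have hm : mid = (a :: b :: t).length / 2 := rfl
    rw [hm] at ih1 ih2
    have h2 := pvF_append ((a :: b :: t).take ((a :: b :: t).length / 2))
      ((a :: b :: t).drop ((a :: b :: t).length / 2))
    rw [List.take_append_drop] at h2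
    simp only [List.length_cons] at ih1 ih2 h2
    rw [sum_basket_alt]
    simp [ih1, ih2, h2]

-- ===== VERDICT (by name: the statement is the Claim_ definition above) =====
theorem sum_basket_spec : Claim_equal_sum_basket := by
  intro l _
  unfold Spec_sum_basket
  rw [sum_basket_eq_pvF, sum_basket_alt_eq_pvF]
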